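-- pv_equiv track=rewrite | github.com/TKontu/kyokki | backend/app/services/off_service.py | map_off_category_to_system
-- ===== SOURCE A (Python) =====
-- def map_off_category_to_system(off_category: str | None) -> str:
--     """Map Open Food Facts category to system category.
--
--     Args:
--         off_category: Category string from OFF (can be comma-separated).
--
--     Returns:
--         System category ID (dairy, meat, produce, etc.).
--     """
--     if not off_category:
--         return "pantry"
--
--     # Convert to lowercase for case-insensitive matching
--     category_lower = off_category.lower()
--
--     # Frozen (check first before produce, as "frozen vegetables" should be frozen)
--     if "frozen" in category_lower:
--         return "frozen"
--
--     # Dairy products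
--     if any(
--         keyword in category_lower
--         for keyword in [
--             "dairy",
--             "milk",
--             "cheese",
--             "yogurt",
--             "yoghurt",
--             "cream",
--             "butter",
--         ]
--     ):
--         return "dairy"
--
--     # Meat products
--     if any(
--         keyword in category_lower
--         for keyword in ["meat", "chicken", "beef", "pork", "poultry", "sausage", "ham"]
--     ):
--         return "meat"
--
--     # Seafood
--     if any(
--         keyword in category_lower for keyword in ["fish", "seafood", "salmon", "tuna"]
--     ):
--         return "seafood"
--
--     # Produce (fruits and vegetables)
--     if any(
--         keyword in category_lower
--         for keyword in ["fruit", "vegetable", "produce", "fresh"]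
--     ):
--         return "produce"
--
--     # Bakery
--     if any(keyword in category_lower for keyword in ["bread", "bakery", "pastry"]):
--         return "bakery"
--
--     # Beverages
--     if any(
--         keyword in category_lower
--         for keyword in ["beverage", "drink", "juice", "soda", "water", "tea", "coffee"]
--     ):
--         return "beverages"
--
--     # Snacks
--     if any(
--         keyword in category_lower for keyword in ["snack", "chip", "candy", "chocolate"]
--     ):
--         return "snacks"
--
--     # Condiments
--     if any(
--         keyword in category_lower
--         for keyword in ["sauce", "condiment", "ketchup", "mustard", "mayonnaise"]
--     ):
--         return "condiments"
--
--     # Grains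
--     if any(
--         keyword in category_lower for keyword in ["grain", "rice", "pasta", "cereal"]
--     ):
--         return "grains"
--
--     # Default to pantry for unknown categories
--     return "pantry"
-- ===== SOURCE B (Python) =====
-- # Flat keyword table: (keyword, priority, category); priority = position of the
-- # category in the original decision cascade (lower wins).
-- KEYWORD_TABLE = [
--     ("frozen", 0, "frozen"),
--     ("dairy", 1, "dairy"), ("milk", 1, "dairy"), ("cheese", 1, "dairy"),
--     ("yogurt", 1, "dairy"), ("yoghurt", 1, "dairy"), ("cream", 1, "dairy"),
--     ("butter", 1, "dairy"),
--     ("meat", 2, "meat"), ("chicken", 2, "meat"), ("beef", 2, "meat"),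
--     ("pork", 2, "meat"), ("poultry", 2, "meat"), ("sausage", 2, "meat"),
--     ("ham", 2, "meat"),
--     ("fish", 3, "seafood"), ("seafood", 3, "seafood"), ("salmon", 3, "seafood"),
--     ("tuna", 3, "seafood"),
--     ("fruit", 4, "produce"), ("vegetable", 4, "produce"), ("produce", 4, "produce"),
--     ("fresh", 4, "produce"),
--     ("bread", 5, "bakery"), ("bakery", 5, "bakery"), ("pastry", 5, "bakery"),
--     ("beverage", 6, "beverages"), ("drink", 6, "beverages"), ("juice", 6, "beverages"),
--     ("soda", 6, "beverages"), ("water", 6, "beverages"), ("tea", 6, "beverages"),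
--     ("coffee", 6, "beverages"),
--     ("snack", 7, "snacks"), ("chip", 7, "snacks"), ("candy", 7, "snacks"),
--     ("chocolate", 7, "snacks"),
--     ("sauce", 8, "condiments"), ("condiment", 8, "condiments"),
--     ("ketchup", 8, "condiments"), ("mustard", 8, "condiments"),
--     ("mayonnaise", 8, "condiments"),
--     ("grain", 9, "grains"), ("rice", 9, "grains"), ("pasta", 9, "grains"),
--     ("cereal", 9, "grains"),
-- ]
--
--
-- def map_off_category_to_system(off_category):
--     """Map Open Food Facts category to system category.
--
--     Naive multi-pattern scan: walk the lowercased string once position by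
--     position, try every keyword with str.startswith there, and keep the hit
--     with the lowest priority; no substring operator, no early return.
--     """
--     if not off_category:
--         return "pantry"
--     s = off_category.lower()
--     best = (10, "pantry")
--     for pos in range(len(s)):
--         for kw, pri, cat in KEYWORD_TABLE:
--             if pri < best[0] and s.startswith(kw, pos):
--                 best = (pri, cat)
--     return best[1]
-- ===== Notes on version B (the rewrite author's own statement) =====
-- stated objective: alternative
-- what changed: Replaces the per-keyword substring-test cascade with a naive multi-pattern matcher: one left-to-right walk over the lowercased string that tries every keyword of a flat (keyword, priority, category) table with startswith at each position and keeps the lowest-priority hit in an accumulator, with no substring operator and no early return.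
import Mathlib
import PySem

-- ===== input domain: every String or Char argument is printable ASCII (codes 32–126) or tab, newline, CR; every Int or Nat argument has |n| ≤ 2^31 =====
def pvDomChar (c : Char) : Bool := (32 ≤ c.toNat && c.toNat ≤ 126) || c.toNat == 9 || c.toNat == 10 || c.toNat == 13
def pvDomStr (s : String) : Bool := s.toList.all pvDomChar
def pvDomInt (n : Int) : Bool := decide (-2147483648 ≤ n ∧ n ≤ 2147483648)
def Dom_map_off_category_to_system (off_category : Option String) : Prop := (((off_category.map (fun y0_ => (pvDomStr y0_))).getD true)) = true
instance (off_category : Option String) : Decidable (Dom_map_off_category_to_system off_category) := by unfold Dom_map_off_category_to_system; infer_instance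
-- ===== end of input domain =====

-- B replaces the per-keyword substring cascade by a position-driven multi-pattern scan with a min-priority accumulator over a flat keyword table (objective: alternative; return values proved equal).


-- ===== PORT A =====
def map_off_category_to_system (off_category : Option String) : String :=
  match off_category with
  | none => "pantry"
  | some s =>
    if s.toList.isEmpty then "pantry"
    else
      let category_lower := PySem.Str.lower s
      if PySem.Str.isIn "frozen" category_lower then "frozen"
      else if ["dairy", "milk", "cheese", "yogurt", "yoghurt", "cream", "butter"].any
          (fun keyword => PySem.Str.isIn keyword category_lower) then "dairy"
      else if ["meat", "chicken", "beef", "pork", "poultry", "sausage", "ham"].any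
          (fun keyword => PySem.Str.isIn keyword category_lower) then "meat"
      else if ["fish", "seafood", "salmon", "tuna"].any
          (fun keyword => PySem.Str.isIn keyword category_lower) then "seafood"
      else if ["fruit", "vegetable", "produce", "fresh"].any
          (fun keyword => PySem.Str.isIn keyword category_lower) then "produce"
      else if ["bread", "bakery", "pastry"].any
          (fun keyword => PySem.Str.isIn keyword category_lower) then "bakery"
      else if ["beverage", "drink", "juice", "soda", "water", "tea", "coffee"].any
          (fun keyword => PySem.Str.isIn keyword category_lower) then "beverages"
      else if ["snack", "chip", "candy", "chocolate"].any
          (fun keyword => PySem.Str.isIn keyword category_lower) then "snacks"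
      else if ["sauce", "condiment", "ketchup", "mustard", "mayonnaise"].any
          (fun keyword => PySem.Str.isIn keyword category_lower) then "condiments"
      else if ["grain", "rice", "pasta", "cereal"].any
          (fun keyword => PySem.Str.isIn keyword category_lower) then "grains"
      else "pantry"

-- ===== PORT B =====
-- Source B's flat KEYWORD_TABLE: (keyword, priority, category)
def pvTable : List (String × Nat × String) :=
  [("frozen", 0, "frozen"),
   ("dairy", 1, "dairy"), ("milk", 1, "dairy"), ("cheese", 1, "dairy"),
   ("yogurt", 1, "dairy"), ("yoghurt", 1, "dairy"), ("cream", 1, "dairy"),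
   ("butter", 1, "dairy"),
   ("meat", 2, "meat"), ("chicken", 2, "meat"), ("beef", 2, "meat"),
   ("pork", 2, "meat"), ("poultry", 2, "meat"), ("sausage", 2, "meat"),
   ("ham", 2, "meat"),
   ("fish", 3, "seafood"), ("seafood", 3, "seafood"), ("salmon", 3, "seafood"),
   ("tuna", 3, "seafood"),
   ("fruit", 4, "produce"), ("vegetable", 4, "produce"), ("produce", 4, "produce"),
   ("fresh", 4, "produce"),
   ("bread", 5, "bakery"), ("bakery", 5, "bakery"), ("pastry", 5, "bakery"),
   ("beverage", 6, "beverages"), ("drink", 6, "beverages"), ("juice", 6, "beverages"),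
   ("soda", 6, "beverages"), ("water", 6, "beverages"), ("tea", 6, "beverages"),
   ("coffee", 6, "beverages"),
   ("snack", 7, "snacks"), ("chip", 7, "snacks"), ("candy", 7, "snacks"),
   ("chocolate", 7, "snacks"),
   ("sauce", 8, "condiments"), ("condiment", 8, "condiments"),
   ("ketchup", 8, "condiments"), ("mustard", 8, "condiments"),
   ("mayonnaise", 8, "condiments"),
   ("grain", 9, "grains"), ("rice", 9, "grains"), ("pasta", 9, "grains"),
   ("cereal", 9, "grains")]

-- Python's `s.startswith(kw, pos)` for 0 ≤ pos < len(s) is exactly `kw.toList <+: cl.drop pos`,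
-- i.e. PySem.Chars.startswith (cl.drop pos) kw.toList; the outer loop is `for pos in range(len(s))`.
def map_off_category_to_system_alt (off_category : Option String) : String :=
  match off_category with
  | none => "pantry"
  | some s =>
    if s.toList.isEmpty then "pantry"
    else
      let cl := (PySem.Str.lower s).toList
      let best := (List.range cl.length).foldl
        (fun best pos =>
          pvTable.foldl
            (fun best e =>
              if e.2.1 < best.1 && PySem.Chars.startswith (cl.drop pos) e.1.toList
              then (e.2.1, e.2.2) else best)
            best)
        (10, "pantry")
      best.2

-- ===== PRECONDITION & SPEC =====
def Spec_map_off_category_to_system (off_category : Option String) (out : String) : Prop := out = map_off_category_to_system_alt off_category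
instance (off_category : Option String) (out : String) : Decidable (Spec_map_off_category_to_system off_category out) := by unfold Spec_map_off_category_to_system; infer_instance

-- ===== CLAIM =====
def Claim_equal_map_off_category_to_system : Prop := ∀ (off_category : Option String), Dom_map_off_category_to_system off_category → Spec_map_off_category_to_system off_category (map_off_category_to_system off_category)

-- ===== LEMMAS AND PROOFS =====

-- Proof-side views of the fixed data: the ten keyword groups and their category names, in cascade order.
def pvCats : List String :=
  ["frozen", "dairy", "meat", "seafood", "produce", "bakery", "beverages", "snacks", "condiments", "grains"]

def pvGroups : List (List String) :=
  [["frozen"],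
   ["dairy", "milk", "cheese", "yogurt", "yoghurt", "cream", "butter"],
   ["meat", "chicken", "beef", "pork", "poultry", "sausage", "ham"],
   ["fish", "seafood", "salmon", "tuna"],
   ["fruit", "vegetable", "produce", "fresh"],
   ["bread", "bakery", "pastry"],
   ["beverage", "drink", "juice", "soda", "water", "tea", "coffee"],
   ["snack", "chip", "candy", "chocolate"],
   ["sauce", "condiment", "ketchup", "mustard", "mayonnaise"],
   ["grain", "rice", "pasta", "cereal"]]

-- "some keyword of group i occurs in cl"
def pvG (cl : List Char) (i : Nat) : Bool :=
  (pvGroups.getD i []).any (fun k => PySem.Chars.isIn k.toList cl)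

-- A's cascade, expressed through pvG.
def pvCascade (cl : List Char) : String :=
  if pvG cl 0 then "frozen"
  else if pvG cl 1 then "dairy"
  else if pvG cl 2 then "meat"
  else if pvG cl 3 then "seafood"
  else if pvG cl 4 then "produce"
  else if pvG cl 5 then "bakery"
  else if pvG cl 6 then "beverages"
  else if pvG cl 7 then "snacks"
  else if pvG cl 8 then "condiments"
  else if pvG cl 9 then "grains"
  else "pantry"

-- B's nested fold, named.
def pvBest (cl : List Char) : Nat × String :=
  (List.range cl.length).foldl
    (fun best pos =>
      pvTable.foldl
        (fun best e =>
          if e.2.1 < best.1 && PySem.Chars.startswith (cl.drop pos) e.1.toList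
          then (e.2.1, e.2.2) else best)
        best)
    (10, "pantry")

-- facts about the fixed table, checked by computation
theorem pvTable_facts : ∀ e ∈ pvTable,
    e.2.1 < 10 ∧ e.2.2 = pvCats.getD e.2.1 "pantry" ∧ e.1 ∈ pvGroups.getD e.2.1 [] := by decide

theorem pvGroups_facts : ∀ i < 10, ∀ kw ∈ pvGroups.getD i [],
    kw.toList ≠ [] ∧ (kw, i, pvCats.getD i "pantry") ∈ pvTable := by decide

-- generic characterisation of the min-priority accumulator fold
theorem pvFold_spec {α : Type} (cond : α → Bool) (pri : α → Nat) (cat : α → String) :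
    ∀ (xs : List α) (b0 : Nat × String),
      let r := xs.foldl (fun b x => if pri x < b.1 && cond x then (pri x, cat x) else b) b0
      (r = b0 ∨ ∃ x ∈ xs, cond x = true ∧ r = (pri x, cat x)) ∧
      r.1 ≤ b0.1 ∧
      ∀ x ∈ xs, cond x = true → r.1 ≤ pri x := by
  intro xs
  induction xs with
  | nil => intro b0; exact ⟨Or.inl rfl, le_refl _, by simp⟩
  | cons a xs ih =>
    intro b0
    simp only [List.foldl_cons]
    set b1 := (if pri a < b0.1 && cond a then (pri a, cat a) else b0) with hb1
    obtain ⟨hd, hle, hmin⟩ := ih b1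
    have hb1le : b1.1 ≤ b0.1 := by
      rw [hb1]; split
      · rename_i h; simp only [Bool.and_eq_true, decide_eq_true_eq] at h; exact le_of_lt h.1
      · exact le_refl _
    refine ⟨?_, le_trans hle hb1le, ?_⟩
    · rcases hd with hd | ⟨x, hx, hc, hr⟩
      · by_cases h : (pri a < b0.1 && cond a) = true
        · have hba : b1 = (pri a, cat a) := by rw [hb1, if_pos h]
          exact Or.inr ⟨a, List.mem_cons_self, ((Bool.and_eq_true ..).mp h).2, hd.trans hba⟩
        · have hba : b1 = b0 := by rw [hb1, if_neg h]
          exact Or.inl (hd.trans hba)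
      · exact Or.inr ⟨x, List.mem_cons_of_mem _ hx, hc, hr⟩
    · intro x hx hc
      rcases List.mem_cons.mp hx with rfl | hx'
      · by_cases h : pri x < b0.1
        · have : b1.1 ≤ pri x := by rw [hb1]; simp [h, hc]
          exact le_trans hle this
        · exact le_trans (le_trans hle hb1le) (Nat.le_of_not_lt h)
      · exact hmin x hx' hc

theorem pvFoldl_flatMap {α β γ : Type} (g : α → List β) (f : γ → β → γ) :
    ∀ (xs : List α) (b : γ), (xs.flatMap g).foldl f b = xs.foldl (fun b a => (g a).foldl f b) b := by
  intro xs
  induction xs with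
  | nil => intro b; rfl
  | cons a xs ih => intro b; simp [List.flatMap_cons, List.foldl_append, ih]

-- all (position, table-entry) pairs B examines
def pvPairs (cl : List Char) : List (Nat × String × Nat × String) :=
  (List.range cl.length).flatMap (fun pos => pvTable.map (fun e => (pos, e)))

theorem pvMem_pairs (cl : List Char) (x : Nat × String × Nat × String) :
    x ∈ pvPairs cl ↔ x.1 < cl.length ∧ x.2 ∈ pvTable := by
  obtain ⟨pos, e⟩ := x
  simp [pvPairs, List.mem_flatMap, List.mem_map, List.mem_range]

theorem pvBest_eq_fold (cl : List Char) :
    pvBest cl = (pvPairs cl).foldl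
      (fun b x => if x.2.2.1 < b.1 && PySem.Chars.startswith (cl.drop x.1) x.2.1.toList
                  then (x.2.2.1, x.2.2.2) else b) (10, "pantry") := by
  rw [pvPairs, pvFoldl_flatMap]
  unfold pvBest
  simp [List.foldl_map]

-- "group i has an occurrence" stated via start positions ↔ stated via substring tests
theorem pvMatched_iff (cl : List Char) (i : Nat) (hi : i < 10) :
    (∃ e ∈ pvTable, e.2.1 = i ∧ ∃ pos < cl.length,
        PySem.Chars.startswith (cl.drop pos) e.1.toList = true) ↔ pvG cl i = true := by
  constructor
  · rintro ⟨e, he, rfl, pos, _, hsw⟩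
    obtain ⟨-, -, hmem⟩ := pvTable_facts e he
    have hinf : PySem.Chars.isIn e.1.toList cl = true :=
      (PySem.Chars.exists_prefix_drop_iff_isIn _ _).mp
        ⟨pos, (PySem.Chars.startswith_iff _ _).mp hsw⟩
    exact List.any_eq_true.mpr ⟨e.1, hmem, hinf⟩
  · intro hg
    obtain ⟨kw, hkw, hin⟩ := List.any_eq_true.mp hg
    obtain ⟨hne, hmemT⟩ := pvGroups_facts i hi kw hkw
    obtain ⟨j, hpre⟩ := (PySem.Chars.exists_prefix_drop_iff_isIn _ _).mpr hin
    have hj : j < cl.length := by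
      by_contra h
      have : cl.drop j = [] := List.drop_eq_nil_of_le (Nat.le_of_not_lt h)
      rw [this] at hpre
      exact hne (List.prefix_nil.mp hpre)
    exact ⟨(kw, i, pvCats.getD i "pantry"), hmemT, rfl, j, hj,
      (PySem.Chars.startswith_iff _ _).mpr hpre⟩

-- characterisation of B's result
theorem pvBest_char (cl : List Char) :
    (pvBest cl).2 = pvCats.getD (pvBest cl).1 "pantry" ∧
    ((pvBest cl).1 = 10 ∨ ((pvBest cl).1 < 10 ∧ pvG cl (pvBest cl).1 = true)) ∧
    (∀ i < 10, pvG cl i = true → (pvBest cl).1 ≤ i) := by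
  rw [pvBest_eq_fold]
  obtain ⟨hd, -, hmin⟩ := pvFold_spec
    (fun x => PySem.Chars.startswith (cl.drop x.1) x.2.1.toList)
    (fun x => x.2.2.1) (fun x => x.2.2.2) (pvPairs cl) (10, "pantry")
  set r := (pvPairs cl).foldl
      (fun b x => if x.2.2.1 < b.1 && PySem.Chars.startswith (cl.drop x.1) x.2.1.toList
                  then (x.2.2.1, x.2.2.2) else b) (10, "pantry") with hr
  refine ⟨?_, ?_, ?_⟩
  · rcases hd with hd | ⟨x, hx, -, hrx⟩
    · rw [hd]; rfl
    · obtain ⟨-, hcat, -⟩ := pvTable_facts x.2 ((pvMem_pairs cl x).mp hx).2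
      rw [hrx]; exact hcat
  · rcases hd with hd | ⟨x, hx, hc, hrx⟩
    · exact Or.inl (by rw [hd])
    · obtain ⟨hpos, hmem⟩ := (pvMem_pairs cl x).mp hx
      obtain ⟨hlt, -, -⟩ := pvTable_facts x.2 hmem
      refine Or.inr ⟨by rw [hrx]; exact hlt, ?_⟩
      rw [hrx]
      exact (pvMatched_iff cl x.2.2.1 hlt).mp ⟨x.2, hmem, rfl, x.1, hpos, hc⟩
  · intro i hi hg
    obtain ⟨e, hmem, hpri, pos, hpos, hsw⟩ := (pvMatched_iff cl i hi).mpr hg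
    have := hmin (pos, e) ((pvMem_pairs cl (pos, e)).mpr ⟨hpos, hmem⟩) hsw
    simpa [hpri] using this

-- A's cascade picks pvCats[p] whenever p behaves like the least matched group index
theorem pvCascade_eq (cl : List Char) (p : Nat)
    (hg : p = 10 ∨ (p < 10 ∧ pvG cl p = true))
    (hmin : ∀ i < 10, pvG cl i = true → p ≤ i) :
    pvCascade cl = pvCats.getD p "pantry" := by
  unfold pvCascade
  by_cases h0 : pvG cl 0 = true
  · have hp : p = 0 := Nat.le_zero.mp (hmin 0 (by omega) h0)
    simp [h0, hp, pvCats]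
  · by_cases h1 : pvG cl 1 = true
    · have hle : p ≤ 1 := hmin 1 (by omega) h1
      have hp : p = 1 := by
        rcases hg with rfl | ⟨hlt, hgp⟩
        · omega
        · interval_cases p <;> simp_all
      simp [h0, h1, hp, pvCats]
    · by_cases h2 : pvG cl 2 = true
      · have hle : p ≤ 2 := hmin 2 (by omega) h2
        have hp : p = 2 := by
          rcases hg with rfl | ⟨hlt, hgp⟩
          · omega
          · interval_cases p <;> simp_all
        simp [h0, h1, h2, hp, pvCats]
      · by_cases h3 : pvG cl 3 = true
        · have hle : p ≤ 3 := hmin 3 (by omega) h3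
          have hp : p = 3 := by
            rcases hg with rfl | ⟨hlt, hgp⟩
            · omega
            · interval_cases p <;> simp_all
          simp [h0, h1, h2, h3, hp, pvCats]
        · by_cases h4 : pvG cl 4 = true
          · have hle : p ≤ 4 := hmin 4 (by omega) h4
            have hp : p = 4 := by
              rcases hg with rfl | ⟨hlt, hgp⟩
              · omega
              · interval_cases p <;> simp_all
            simp [h0, h1, h2, h3, h4, hp, pvCats]
          · by_cases h5 : pvG cl 5 = true
            · have hle : p ≤ 5 := hmin 5 (by omega) h5
              have hp : p = 5 := by
                rcases hg with rfl | ⟨hlt, hgp⟩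
                · omega
                · interval_cases p <;> simp_all
              simp [h0, h1, h2, h3, h4, h5, hp, pvCats]
            · by_cases h6 : pvG cl 6 = true
              · have hle : p ≤ 6 := hmin 6 (by omega) h6
                have hp : p = 6 := by
                  rcases hg with rfl | ⟨hlt, hgp⟩
                  · omega
                  · interval_cases p <;> simp_all
                simp [h0, h1, h2, h3, h4, h5, h6, hp, pvCats]
              · by_cases h7 : pvG cl 7 = true
                · have hle : p ≤ 7 := hmin 7 (by omega) h7
                  have hp : p = 7 := by
                    rcases hg with rfl | ⟨hlt, hgp⟩
                    · omega
                    · interval_cases p <;> simp_all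
                  simp [h0, h1, h2, h3, h4, h5, h6, h7, hp, pvCats]
                · by_cases h8 : pvG cl 8 = true
                  · have hle : p ≤ 8 := hmin 8 (by omega) h8
                    have hp : p = 8 := by
                      rcases hg with rfl | ⟨hlt, hgp⟩
                      · omega
                      · interval_cases p <;> simp_all
                    simp [h0, h1, h2, h3, h4, h5, h6, h7, h8, hp, pvCats]
                  · by_cases h9 : pvG cl 9 = true
                    · have hle : p ≤ 9 := hmin 9 (by omega) h9
                      have hp : p = 9 := by
                        rcases hg with rfl | ⟨hlt, hgp⟩
                        · omega
                        · interval_cases p <;> simp_all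
                      simp [h0, h1, h2, h3, h4, h5, h6, h7, h8, h9, hp, pvCats]
                    · have hp : p = 10 := by
                        rcases hg with rfl | ⟨hlt, hgp⟩
                        · rfl
                        · interval_cases p <;> simp_all
                      simp [h0, h1, h2, h3, h4, h5, h6, h7, h8, h9, hp, pvCats]

theorem pvA_eq (s : String) (h : s.toList.isEmpty = false) :
    map_off_category_to_system (some s) = pvCascade ((PySem.Str.lower s).toList) := by
  simp only [map_off_category_to_system, pvCascade, pvG, pvGroups, h, Bool.false_eq_true,
    if_false, List.getD, List.getElem?_cons_zero, List.getElem?_cons_succ, Option.getD_some,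
    List.any_cons, List.any_nil, Bool.or_false, PySem.Str.isIn_eq]

theorem pvB_eq (s : String) (h : s.toList.isEmpty = false) :
    map_off_category_to_system_alt (some s) = (pvBest ((PySem.Str.lower s).toList)).2 := by
  simp only [map_off_category_to_system_alt, h, Bool.false_eq_true, if_false]
  rfl

-- ===== VERDICT =====
theorem map_off_category_to_system_spec : Claim_equal_map_off_category_to_system := by
  intro o _
  unfold Spec_map_off_category_to_system
  cases o with
  | none => rfl
  | some s =>
    by_cases h : s.toList.isEmpty = true
    · simp [map_off_category_to_system, map_off_category_to_system_alt, h]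
    · have h' : s.toList.isEmpty = false := by simpa using h
      rw [pvA_eq s h', pvB_eq s h']
      obtain ⟨hcat, hg, hmin⟩ := pvBest_char ((PySem.Str.lower s).toList)
      rw [hcat]
      exact pvCascade_eq _ _ hg hmin
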